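-- pv_equiv track=rewrite | github.com/hasanicahyadi/sudoku-solver | v16_functions.py | GetCellNote
-- ===== SOURCE A (Python) =====
-- numbers: list[int] = [1,2,3,4,5,6,7,8,9]
--
-- def GetCellNote(ValuesData):
--     answers = []
--     for number in numbers:
--         valid = True
--         for values in ValuesData:
--             if number in values:
--                 valid = False
--                 break
--         if valid: answers.append(number)
--     return answers
-- ===== SOURCE B (Python) =====
-- numbers: list[int] = [1,2,3,4,5,6,7,8,9]
--
-- def GetCellNote(ValuesData):
--     seen = set()
--     for values in ValuesData:
--         seen.update(values)
--     return [n for n in numbers if n not in seen]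
-- ===== Notes on version B (the rewrite author's own statement) =====
-- stated objective: simpler
-- what changed: Builds one union set of all values in a single pass, then filters 1-9 against it, instead of re-scanning every collection for each candidate number.
import Mathlib
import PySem

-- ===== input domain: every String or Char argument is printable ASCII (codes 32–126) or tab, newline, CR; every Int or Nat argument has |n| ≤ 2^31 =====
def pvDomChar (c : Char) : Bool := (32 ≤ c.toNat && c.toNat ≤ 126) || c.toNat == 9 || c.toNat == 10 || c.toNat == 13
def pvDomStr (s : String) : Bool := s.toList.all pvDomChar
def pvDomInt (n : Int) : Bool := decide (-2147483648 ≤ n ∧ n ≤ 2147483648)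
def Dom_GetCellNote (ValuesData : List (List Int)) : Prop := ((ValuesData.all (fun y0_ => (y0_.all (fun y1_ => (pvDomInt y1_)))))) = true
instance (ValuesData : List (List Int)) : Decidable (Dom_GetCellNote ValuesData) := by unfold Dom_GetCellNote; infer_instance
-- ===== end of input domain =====

-- B builds one union set of all values in a single pass and filters 1-9 against it (simpler; return value only).

-- ===== PORT A =====
-- inner 'for values in ValuesData: if number in values: valid = False; break'
def pvAValid (number : Int) : List (List Int) → Bool
  | [] => true
  | values :: rest => if values.contains number then false else pvAValid number rest

def GetCellNote (ValuesData : List (List Int)) : List Int :=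
  ([1,2,3,4,5,6,7,8,9] : List Int).foldl
    (fun answers number => if pvAValid number ValuesData then answers ++ [number] else answers) []

-- ===== PORT B =====
def GetCellNote_alt (ValuesData : List (List Int)) : List Int :=
  let seen := ValuesData.foldl (fun s values => PySem.Set.update s values) PySem.Set.empty
  ([1,2,3,4,5,6,7,8,9] : List Int).filter (fun n => !(PySem.Set.contains seen n))

-- ===== PRECONDITION & SPEC =====
def Spec_GetCellNote (ValuesData : List (List Int)) (out : List Int) : Prop := out = GetCellNote_alt ValuesData
instance (ValuesData : List (List Int)) (out : List Int) : Decidable (Spec_GetCellNote ValuesData out) := by unfold Spec_GetCellNote; infer_instance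

-- ===== CLAIM (what is proved, stated in full; the proofs are below) =====
def Claim_equal_GetCellNote : Prop := ∀ (ValuesData : List (List Int)), Dom_GetCellNote ValuesData → Spec_GetCellNote ValuesData (GetCellNote ValuesData)

-- ===== LEMMAS AND PROOFS =====
lemma pvAValid_iff (n : Int) (vd : List (List Int)) :
    pvAValid n vd = true ↔ ∀ v ∈ vd, n ∉ v := by
  induction vd with
  | nil => simp [pvAValid]
  | cons v rest ih =>
    by_cases h : v.contains n <;> simp_all [pvAValid]

lemma mem_foldl_update (vd : List (List Int)) (s : PySem.Set Int) (n : Int) :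
    n ∈ vd.foldl (fun s values => PySem.Set.update s values) s ↔ n ∈ s ∨ ∃ v ∈ vd, n ∈ v := by
  induction vd generalizing s with
  | nil => simp
  | cons v rest ih =>
    simp [List.foldl_cons, ih, PySem.Set.mem_update]
    tauto

lemma pvAValid_eq_not_contains (n : Int) (vd : List (List Int)) :
    pvAValid n vd = !(vd.foldl (fun s values => PySem.Set.update s values) PySem.Set.empty).contains n := by
  rw [Bool.eq_iff_iff]
  simp [pvAValid_iff, mem_foldl_update, PySem.Set.empty]

-- ===== VERDICT (by name: the statement is the Claim_ definition above) =====
theorem GetCellNote_spec : Claim_equal_GetCellNote := by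
  intro vd _
  show GetCellNote vd = GetCellNote_alt vd
  unfold GetCellNote GetCellNote_alt
  rw [PySem.List.foldl_append_if_eq_filter]
  simp only [List.nil_append]
  apply List.filter_congr
  intro n _
  exact pvAValid_eq_not_contains n vd
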